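-- pv_equiv track=rewrite | github.com/luaartist/kicad-schematic-importer-windows | fix_example_collection.py | is_html_content
-- ===== SOURCE A (Python) =====
-- def is_html_content(content: str) -> bool:
--     """Check if content is HTML instead of Python code"""
--     html_indicators = [
--         '<!DOCTYPE html>',
--         '<html',
--         '<div class="Box-body">',
--         'class="blob-code',
--         '<table class="highlight">'
--     ]
--     return any(indicator in content for indicator in html_indicators)
-- ===== SOURCE B (Python) =====
-- def is_html_content(content: str) -> bool:
--     """Check if content is HTML instead of Python code"""
--     indicators = (
--         '<!DOCTYPE html>',
--         '<html',
--         '<div class="Box-body">',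
--         'class="blob-code',
--         '<table class="highlight">',
--     )
--     for i in range(len(content)):
--         if any(content.startswith(ind, i) for ind in indicators):
--             return True
--     return False
-- ===== Notes on version B (the rewrite author's own statement) =====
-- stated objective: alternative
-- what changed: Replaces the five independent whole-string substring scans ('in' per indicator) with a single left-to-right sweep over positions that tests all five indicators as prefixes at each position.
import Mathlib
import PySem

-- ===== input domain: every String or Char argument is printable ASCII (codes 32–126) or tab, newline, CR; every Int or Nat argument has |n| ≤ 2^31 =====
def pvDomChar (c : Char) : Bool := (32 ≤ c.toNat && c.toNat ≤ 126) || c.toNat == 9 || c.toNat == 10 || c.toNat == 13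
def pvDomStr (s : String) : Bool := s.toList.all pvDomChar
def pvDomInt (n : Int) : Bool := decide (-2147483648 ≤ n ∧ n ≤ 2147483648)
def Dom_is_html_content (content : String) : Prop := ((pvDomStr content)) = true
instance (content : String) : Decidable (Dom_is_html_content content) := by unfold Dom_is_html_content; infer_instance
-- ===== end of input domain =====

-- B replaces five independent substring scans with a single left-to-right sweep testing all indicators as prefixes at each position (alternative decomposition, same cost).


-- ===== PORT A =====
-- literal port of A: 'any(indicator in content for indicator in html_indicators)'
def is_html_content (content : String) : Bool :=
  let html_indicators : List String :=
    ["<!DOCTYPE html>", "<html", "<div class=\"Box-body\">", "class=\"blob-code", "<table class=\"highlight\">"]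
  html_indicators.any (fun indicator => PySem.Str.isIn indicator content)

-- ===== PORT B =====
-- the loop 'for i in range(len(content)): if any(content.startswith(ind, i) ...)' as recursion over the suffixes
def pvScanB (inds : List (List Char)) : List Char → Bool
  | [] => false
  | c :: cs => if inds.any (fun ind => ind.isPrefixOf (c :: cs)) then true else pvScanB inds cs

def is_html_content_alt (content : String) : Bool :=
  let indicators : List String :=
    ["<!DOCTYPE html>", "<html", "<div class=\"Box-body\">", "class=\"blob-code", "<table class=\"highlight\">"]
  pvScanB (indicators.map String.toList) content.toList

-- ===== PRECONDITION & SPEC =====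
def Spec_is_html_content (content : String) (out : Bool) : Prop := out = is_html_content_alt content
instance (content : String) (out : Bool) : Decidable (Spec_is_html_content content out) := by unfold Spec_is_html_content; infer_instance

-- ===== CLAIM (what is proved, stated in full; the proofs are below) =====
def Claim_equal_is_html_content : Prop := ∀ (content : String), Dom_is_html_content content → Spec_is_html_content content (is_html_content content)

-- ===== LEMMAS AND PROOFS =====

-- the sweep decides 'some nonempty indicator is an infix'
theorem pvScanB_eq_any_isIn (inds : List (List Char)) (h : ∀ ind ∈ inds, ind ≠ []) :
    ∀ l : List Char, pvScanB inds l = inds.any (fun ind => PySem.Chars.isIn ind l) := by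
  intro l
  induction l with
  | nil =>
    simp only [pvScanB]
    symm
    rw [List.any_eq_false]
    intro ind hmem
    rw [PySem.Chars.isIn_iff_infix, List.infix_nil]
    exact h ind hmem
  | cons c cs ih =>
    simp only [pvScanB]
    split
    · rename_i hpre
      symm
      rw [List.any_eq_true] at hpre ⊢
      obtain ⟨ind, hmem, hp⟩ := hpre
      exact ⟨ind, hmem, (PySem.Chars.isIn_iff_infix _ _).mpr
        (List.isPrefixOf_iff_prefix.mp hp).isInfix⟩
    · rename_i hpre
      rw [ih]
      rw [Bool.not_eq_true, List.any_eq_false] at hpre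
      cases hA : inds.any (fun ind => PySem.Chars.isIn ind cs) with
      | true =>
        symm
        rw [List.any_eq_true] at hA ⊢
        obtain ⟨ind, hmem, hi⟩ := hA
        exact ⟨ind, hmem, (PySem.Chars.isIn_iff_infix _ _).mpr
          (((PySem.Chars.isIn_iff_infix _ _).mp hi).trans (List.suffix_cons c cs).isInfix)⟩
      | false =>
        symm
        rw [List.any_eq_false] at hA ⊢
        intro ind hmem
        rw [PySem.Chars.isIn_iff_infix]
        intro hinf
        rcases List.infix_cons_iff.mp hinf with hp | hs
        · exact hpre ind hmem (List.isPrefixOf_iff_prefix.mpr hp)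
        · exact hA ind hmem ((PySem.Chars.isIn_iff_infix _ _).mpr hs)

-- ===== VERDICT (by name: the statement is the Claim_ definition above) =====
theorem is_html_content_spec : Claim_equal_is_html_content := by
  intro content _
  unfold Spec_is_html_content is_html_content is_html_content_alt
  rw [pvScanB_eq_any_isIn _ (by decide)]
  simp [PySem.Str.isIn_eq, PySem.Chars.isIn]
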